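-- pv_equiv track=rewrite | github.com/lp1225/my_algorithm | other_algorithm/Mypy_digui.py | find_max02
-- ===== SOURCE A (Python) =====
-- def find_max02(arr, l, r):
--     """二分递归"""
--     if l == r:
--         return arr[l]
--     else:
--         mid = int((l+r)/2)
--         max_left = find_max02(arr, l, mid)
--         max_right = find_max02(arr, mid+1, r)
--         return max(max_left, max_right)
-- ===== SOURCE B (Python) =====
-- def find_max02(arr, l, r):
--     """二分递归 -> iterative left-to-right scan"""
--     m = arr[l]
--     for i in range(l + 1, r + 1):
--         if arr[i] > m:
--             m = arr[i]
--     return m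
-- ===== Notes on version B (the rewrite author's own statement) =====
-- stated objective: simpler
-- what changed: Replaced the divide-and-conquer binary recursion (split at midpoint, recurse on both halves, merge with max) by a single iterative left-to-right scan keeping a running maximum; the loop avoids Python call/recursion overhead.
import Mathlib
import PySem

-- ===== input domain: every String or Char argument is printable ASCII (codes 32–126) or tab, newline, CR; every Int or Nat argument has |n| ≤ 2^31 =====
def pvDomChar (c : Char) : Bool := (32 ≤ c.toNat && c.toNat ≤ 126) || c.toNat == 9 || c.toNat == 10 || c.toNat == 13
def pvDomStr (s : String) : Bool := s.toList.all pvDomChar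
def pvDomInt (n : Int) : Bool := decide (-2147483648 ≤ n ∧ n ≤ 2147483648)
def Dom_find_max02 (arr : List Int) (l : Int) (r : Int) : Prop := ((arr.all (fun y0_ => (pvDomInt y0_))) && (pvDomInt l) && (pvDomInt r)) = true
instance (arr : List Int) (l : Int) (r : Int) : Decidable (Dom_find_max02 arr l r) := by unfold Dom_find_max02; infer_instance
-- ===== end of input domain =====

-- B replaces the midpoint-splitting binary recursion by a single iterative
-- left-to-right scan with a running maximum (simpler; same O(n) work).

-- ===== PORT A =====
-- Literal port of A's binary recursion; the fuel argument only makes the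
-- non-structural recursion total (inside Pre_ the fuel never runs out).
-- 'int((l+r)/2)' truncates toward zero: Int.tdiv is exact for these values.
def find_max02_fuel (fuel : Nat) (arr : List Int) (l : Int) (r : Int) : Int :=
  match fuel with
  | 0 => 0
  | fuel + 1 =>
    if l = r then (PySem.List.pyGet? arr l).getD 0
    else
      let mid := (l + r).tdiv 2
      let max_left := find_max02_fuel fuel arr l mid
      let max_right := find_max02_fuel fuel arr (mid + 1) r
      max max_left max_right

def find_max02 (arr : List Int) (l : Int) (r : Int) : Int :=
  find_max02_fuel ((r - l).toNat + 1) arr l r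

-- ===== PORT B =====
def find_max02_alt (arr : List Int) (l : Int) (r : Int) : Int :=
  (PySem.List.pyRange (l + 1) (r + 1) 1).foldl
    (fun m i =>
      let v := (PySem.List.pyGet? arr i).getD 0
      if v > m then v else m)
    ((PySem.List.pyGet? arr l).getD 0)

-- ===== PRECONDITION & SPEC =====
-- Pre_ excludes exactly the inputs on which A raises: l > r or a mixed/negative
-- pair with l < r (infinite recursion / RecursionError), and indices out of
-- range (IndexError).  A returns exactly on valid ascending nonnegative ranges,
-- plus singletons l = r addressed by a valid negative index.
def Pre_find_max02 (arr : List Int) (l : Int) (r : Int) : Prop :=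
  (0 ≤ l ∧ l ≤ r ∧ r < arr.length) ∨
  (l = r ∧ -(arr.length : Int) ≤ l ∧ l < arr.length)
instance (arr : List Int) (l : Int) (r : Int) : Decidable (Pre_find_max02 arr l r) := by
  unfold Pre_find_max02; infer_instance

def pvWitness_find_max02 : List Int × Int × Int := ([3, 1, 4, 1, 5], 1, 4)

def Spec_find_max02 (arr : List Int) (l : Int) (r : Int) (out : Int) : Prop := out = find_max02_alt arr l r
instance (arr : List Int) (l : Int) (r : Int) (out : Int) : Decidable (Spec_find_max02 arr l r out) := by unfold Spec_find_max02; infer_instance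

-- ===== CLAIM (what is proved, stated in full; the proofs are below) =====
def Claim_equal_find_max02 : Prop := ∀ (arr : List Int) (l : Int) (r : Int), Dom_find_max02 arr l r → Pre_find_max02 arr l r → Spec_find_max02 arr l r (find_max02 arr l r)

-- ===== LEMMAS AND PROOFS =====

-- B's loop body is a max
theorem alt_body_max (arr : List Int) (m i : Int) :
    (let v := (PySem.List.pyGet? arr i).getD 0
     if v > m then v else m) = max m ((PySem.List.pyGet? arr i).getD 0) := by
  simp only [max_def]
  split_ifs with h1 h2 h2 <;> omega

theorem alt_eq_fold (arr : List Int) (l r : Int) :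
    find_max02_alt arr l r =
      (PySem.List.pyRange (l + 1) (r + 1) 1).foldl
        (fun m i => max m ((PySem.List.pyGet? arr i).getD 0))
        ((PySem.List.pyGet? arr l).getD 0) := by
  unfold find_max02_alt
  congr 1
  funext m i
  exact alt_body_max arr m i

-- pull a max out of a max-fold
theorem fold_max_comm (arr : List Int) (L : List Int) (a b : Int) :
    L.foldl (fun m i => max m ((PySem.List.pyGet? arr i).getD 0)) (max a b) =
      max a (L.foldl (fun m i => max m ((PySem.List.pyGet? arr i).getD 0)) b) := by
  induction L generalizing b with
  | nil => rfl
  | cons x xs ih =>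
    simp only [List.foldl_cons]
    rw [max_assoc, ih]

-- B as a fold over any split point: B l r = max (B l m) (B (m+1) r) for l ≤ m < r
theorem alt_split (arr : List Int) (l m r : Int) (h1 : l ≤ m) (h2 : m < r) :
    find_max02_alt arr l r = max (find_max02_alt arr l m) (find_max02_alt arr (m + 1) r) := by
  rw [alt_eq_fold, alt_eq_fold, alt_eq_fold]
  rw [PySem.List.pyRange_one_append (l + 1) (m + 1) (r + 1) (by omega) (by omega)]
  rw [List.foldl_append]
  rw [PySem.List.pyRange_one_cons (by omega : m + 1 < r + 1)]
  simp only [List.foldl_cons]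
  rw [fold_max_comm]

theorem alt_singleton (arr : List Int) (l : Int) :
    find_max02_alt arr l l = (PySem.List.pyGet? arr l).getD 0 := by
  unfold find_max02_alt
  rw [PySem.List.pyRange_one_eq_nil (by omega)]
  rfl

theorem fuel_eq_alt (fuel : Nat) (arr : List Int) (l r : Int)
    (hl : 0 ≤ l) (hlr : l ≤ r) (hf : (r - l).toNat < fuel) :
    find_max02_fuel fuel arr l r = find_max02_alt arr l r := by
  induction fuel generalizing l r with
  | zero => omega
  | succ f ih =>
    unfold find_max02_fuel
    by_cases h : l = r
    · subst h
      rw [if_pos rfl, alt_singleton]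
    · simp only [if_neg h]
      have hlr' : l < r := lt_of_le_of_ne hlr h
      have hmid : (l + r).tdiv 2 = (l + r) / 2 := Int.tdiv_eq_ediv_of_nonneg (by omega)
      rw [hmid]
      have hb1 : l ≤ (l + r) / 2 := by omega
      have hb2 : (l + r) / 2 < r := by omega
      rw [ih l ((l + r) / 2) hl hb1 (by omega),
        ih ((l + r) / 2 + 1) r (by omega) (by omega) (by omega)]
      exact (alt_split arr l ((l + r) / 2) r hb1 hb2).symm

-- ===== VERDICT (by name: the statement is the Claim_ definition above) =====
theorem find_max02_spec : Claim_equal_find_max02 := by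
  intro arr l r _ hpre
  unfold Spec_find_max02 find_max02
  rcases hpre with ⟨hl, hlr, _⟩ | ⟨hlr, _, _⟩
  · exact fuel_eq_alt _ arr l r hl hlr (by omega)
  · subst hlr
    unfold find_max02_fuel
    rw [if_pos rfl, alt_singleton]
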